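-- pv_equiv track=rewrite | github.com/robertoBosio/NN2FPGA | nn2fpga/py/backend/ilp_utils.py | generate_valid_combinations
-- ===== SOURCE A (Python) =====
-- def generate_valid_combinations(och, ich, iw, och_clip=2**10, ich_clip=2**10, iw_clip=2**10, op_clip=2**20):
--     """ Generate valid combinations of parallelization over ich, och and ow """
--     combinations = []
--
--     def divisors(n, clip):
--         return [i for i in range(1, n + 1) if (n % i == 0 and i <= clip)]
--
--     for div_och in divisors(och, och_clip):
--         for div_ich in divisors(ich, ich_clip):
--             for div_iw in divisors(iw, iw_clip):
--                 if (div_och * div_ich * div_iw <= op_clip):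
--                     combinations.append((div_och, div_ich, div_iw))
--     return combinations
-- ===== SOURCE B (Python) =====
-- def generate_valid_combinations(och, ich, iw, och_clip=2**10, ich_clip=2**10, iw_clip=2**10, op_clip=2**20):
--     """ Generate valid combinations of parallelization over ich, och and ow """
--
--     def divisors(n, clip):
--         # enumerate divisors in pairs up to sqrt(n): O(sqrt(n)) instead of O(n)
--         small = []
--         large = []
--         i = 1
--         while i * i <= n:
--             if n % i == 0:
--                 small.append(i)
--                 q = n // i
--                 if q != i:
--                     large.append(q)
--             i += 1
--         large.reverse()
--         return [d for d in small + large if d <= clip]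
--
--     d_och = divisors(och, och_clip)
--     d_ich = divisors(ich, ich_clip)
--     d_iw = divisors(iw, iw_clip)
--     return [(a, b, c) for a in d_och for b in d_ich for c in d_iw
--             if a * b * c <= op_clip]
-- ===== Notes on version B (the rewrite author's own statement) =====
-- stated objective: faster
-- what changed: Each divisor list is computed once by paired enumeration up to sqrt(n) (collecting d and n//d) instead of scanning 1..n, and the lists are hoisted out of the nested loops instead of being recomputed on every iteration of the enclosing loops.
import Mathlib
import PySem

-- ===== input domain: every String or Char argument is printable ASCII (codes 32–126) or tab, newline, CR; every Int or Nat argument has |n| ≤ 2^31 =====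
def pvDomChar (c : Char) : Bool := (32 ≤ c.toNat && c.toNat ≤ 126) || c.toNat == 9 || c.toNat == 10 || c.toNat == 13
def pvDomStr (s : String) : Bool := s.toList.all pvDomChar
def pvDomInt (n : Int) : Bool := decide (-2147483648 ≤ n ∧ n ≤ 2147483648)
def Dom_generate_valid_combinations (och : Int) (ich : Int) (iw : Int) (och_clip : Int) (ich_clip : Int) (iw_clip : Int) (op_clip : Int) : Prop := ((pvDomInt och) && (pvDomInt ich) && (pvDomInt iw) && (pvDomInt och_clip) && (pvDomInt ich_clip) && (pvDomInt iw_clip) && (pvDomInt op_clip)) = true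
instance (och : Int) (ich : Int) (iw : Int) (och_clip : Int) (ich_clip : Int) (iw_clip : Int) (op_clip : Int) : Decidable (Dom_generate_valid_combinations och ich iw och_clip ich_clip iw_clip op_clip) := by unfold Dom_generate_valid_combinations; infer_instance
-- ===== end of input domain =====

-- B computes each divisor list once by paired enumeration up to sqrt(n) and hoists the
-- three lists out of the nested loops (A rescans 1..n and recomputes them per iteration); faster.


-- ===== PORT A =====
-- the inner helper 'divisors(n, clip)' of A: one filter pass over range(1, n+1)
def pvDivisorsA (n : Int) (clip : Int) : List Int :=
  (PySem.List.pyRange 1 (n + 1) 1).filter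
    (fun i => PySem.Int.mod n i == 0 && decide (i ≤ clip))

def generate_valid_combinations (och : Int) (ich : Int) (iw : Int) (och_clip : Int) (ich_clip : Int) (iw_clip : Int) (op_clip : Int) : List (List Int) :=
  (pvDivisorsA och och_clip).foldl (fun acc div_och =>
    (pvDivisorsA ich ich_clip).foldl (fun acc2 div_ich =>
      (pvDivisorsA iw iw_clip).foldl (fun acc3 div_iw =>
        if div_och * div_ich * div_iw ≤ op_clip then acc3 ++ [[div_och, div_ich, div_iw]]
        else acc3) acc2) acc) []

-- ===== PORT B =====
-- B's while loop: i walks 1,2,… while i*i <= n, collecting i in `small` and n//i in `large`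
def pvSqrtLoop (n : Int) (i : Int) (small : List Int) (large : List Int) : List Int × List Int :=
  if h : i * i ≤ n then
    if PySem.Int.mod n i == 0 then
      let q := PySem.Int.floordiv n i
      pvSqrtLoop n (i + 1) (small ++ [i]) (if q ≠ i then large ++ [q] else large)
    else pvSqrtLoop n (i + 1) small large
  else (small, large)
termination_by (n + 1 - i).toNat
decreasing_by
  all_goals
    have h1 : i ≤ i * i := by
      rcases le_total i 0 with h' | h'
      · nlinarith [mul_self_nonneg i]
      · nlinarith
    omega

-- B's helper 'divisors(n, clip)'
def pvDivisorsB (n : Int) (clip : Int) : List Int :=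
  let p := pvSqrtLoop n 1 [] []
  (p.1 ++ p.2.reverse).filter (fun d => decide (d ≤ clip))

def generate_valid_combinations_alt (och : Int) (ich : Int) (iw : Int) (och_clip : Int) (ich_clip : Int) (iw_clip : Int) (op_clip : Int) : List (List Int) :=
  let d1 := pvDivisorsB och och_clip
  let d2 := pvDivisorsB ich ich_clip
  let d3 := pvDivisorsB iw iw_clip
  d1.flatMap (fun a => d2.flatMap (fun b =>
    (d3.filter (fun c => decide (a * b * c ≤ op_clip))).map (fun c => [a, b, c])))

-- ===== PRECONDITION & SPEC =====
def Spec_generate_valid_combinations (och : Int) (ich : Int) (iw : Int) (och_clip : Int) (ich_clip : Int) (iw_clip : Int) (op_clip : Int) (out : List (List Int)) : Prop := out = generate_valid_combinations_alt och ich iw och_clip ich_clip iw_clip op_clip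
instance (och : Int) (ich : Int) (iw : Int) (och_clip : Int) (ich_clip : Int) (iw_clip : Int) (op_clip : Int) (out : List (List Int)) : Decidable (Spec_generate_valid_combinations och ich iw och_clip ich_clip iw_clip op_clip out) := by unfold Spec_generate_valid_combinations; infer_instance

-- ===== CLAIM (what is proved, stated in full; the proofs are below) =====
def Claim_equal_generate_valid_combinations : Prop := ∀ (och : Int) (ich : Int) (iw : Int) (och_clip : Int) (ich_clip : Int) (iw_clip : Int) (op_clip : Int), Dom_generate_valid_combinations och ich iw och_clip ich_clip iw_clip op_clip → Spec_generate_valid_combinations och ich iw och_clip ich_clip iw_clip op_clip (generate_valid_combinations och ich iw och_clip ich_clip iw_clip op_clip)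

-- ===== LEMMAS AND PROOFS =====

-- the ascending list of positive divisors of n (no clip)
def pvD (n : Int) : List Int :=
  (PySem.List.pyRange 1 (n + 1) 1).filter (fun d => PySem.Int.mod n d == 0)

-- ideal contents of `small` / `large` collected from index i on
def pvS (n : Int) (i : Int) : List Int :=
  (PySem.List.pyRange i (n + 1) 1).filter
    (fun d => PySem.Int.mod n d == 0 && decide (d * d ≤ n))

def pvL (n : Int) (i : Int) : List Int :=
  ((PySem.List.pyRange i (n + 1) 1).filter
    (fun d => PySem.Int.mod n d == 0 && decide (d * d ≤ n) && decide (d * d ≠ n))).map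
    (fun d => PySem.Int.floordiv n d)

lemma pv_le_sq (i : Int) : i ≤ i * i := by
  rcases le_total i 0 with h' | h'
  · nlinarith [mul_self_nonneg i]
  · nlinarith

lemma pvS_nil {n i : Int} (hi : 1 ≤ i) (h : n < i * i) : pvS n i = [] ∧ pvL n i = [] := by
  have hall : ∀ d ∈ PySem.List.pyRange i (n + 1) 1, ¬ (d * d ≤ n) := by
    intro d hd
    rw [PySem.List.mem_pyRange_one] at hd
    have h1 : i ≤ d := hd.1
    nlinarith
  constructor
  · exact List.filter_eq_nil_iff.mpr (fun d hd => by simp [hall d hd])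
  · rw [pvL, List.filter_eq_nil_iff.mpr (fun d hd => by simp [hall d hd]), List.map_nil]

lemma pvSqrtLoop_spec (n : Int) : ∀ (k : Nat) (i : Int) (small large : List Int),
    1 ≤ i → (n + 1 - i).toNat = k →
    pvSqrtLoop n i small large = (small ++ pvS n i, large ++ pvL n i) := by
  intro k
  induction k with
  | zero =>
    intro i small large hi hk
    have h : ¬ i * i ≤ n := by
      have := pv_le_sq i
      intro hc; omega
    obtain ⟨h1, h2⟩ := pvS_nil hi (not_le.mp h)
    rw [pvSqrtLoop, dif_neg h, h1, h2, List.append_nil, List.append_nil]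
  | succ k ih =>
    intro i small large hi hk
    by_cases h : i * i ≤ n
    · have hii : i ≤ n := le_trans (pv_le_sq i) h
      have hns : i < n + 1 := by omega
      have hkk : (n + 1 - (i + 1)).toNat = k := by omega
      have hSstep : pvS n i =
          (if (PySem.Int.mod n i == 0 && decide (i * i ≤ n)) = true then [i] else [])
            ++ pvS n (i + 1) := by
        rw [pvS, pvS, PySem.List.pyRange_one_cons hns, List.filter_cons]
        split <;> simp
      have hLstep : pvL n i =
          (if (PySem.Int.mod n i == 0 && decide (i * i ≤ n) && decide (i * i ≠ n)) = true
            then [PySem.Int.floordiv n i] else []) ++ pvL n (i + 1) := by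
        rw [pvL, pvL, PySem.List.pyRange_one_cons hns, List.filter_cons]
        split <;> simp
      rw [pvSqrtLoop, dif_pos h]
      by_cases hm : (PySem.Int.mod n i == 0) = true
      · have hdvd : i ∣ n := PySem.Int.mod_eq_zero_iff_dvd n i |>.mp (by simpa using hm)
        have hq : PySem.Int.floordiv n i * i = n := by
          rw [PySem.Int.floordiv_eq_ediv_of_pos (by omega)]
          exact Int.ediv_mul_cancel hdvd
        have hqiff : (PySem.Int.floordiv n i ≠ i) ↔ i * i ≠ n := by
          constructor
          · intro hne hc
            exact hne (by nlinarith [hq])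
          · intro hne hc
            rw [hc] at hq; exact hne hq
        rw [if_pos hm]
        rw [ih (i + 1) (small ++ [i]) _ (by omega) hkk]
        rw [hSstep, hLstep]
        simp only [hm, h, decide_true, Bool.true_and, Bool.and_true, if_pos, decide_eq_true_eq]
        simp only [Prod.mk.injEq]
        refine ⟨by simp, ?_⟩
        by_cases hne : PySem.Int.floordiv n i ≠ i
        · rw [if_pos hne, if_pos (by simp [hqiff.mp hne])]
          simp
        · rw [if_neg hne, if_neg (by simp [hqiff.not_left.mp (by simpa using hne)])]
          simp
      · rw [if_neg hm]
        rw [ih (i + 1) small large (by omega) hkk, hSstep, hLstep]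
        simp [hm]
    · obtain ⟨h1, h2⟩ := pvS_nil hi (not_le.mp h)
      rw [pvSqrtLoop, dif_neg h, h1, h2, List.append_nil, List.append_nil]

-- a strictly increasing list splits as (elements satisfying p) ++ (the rest) when p is
-- downward closed among its members
lemma pv_split (p : Int → Bool) : ∀ (l : List Int), l.Pairwise (· < ·) →
    (∀ a ∈ l, ∀ b ∈ l, a ≤ b → p b = true → p a = true) →
    l = l.filter p ++ l.filter (fun x => !(p x)) := by
  intro l
  induction l with
  | nil => intro _ _; rfl
  | cons x xs ih =>
    intro hp hcl
    rw [List.pairwise_cons] at hp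
    by_cases hx : p x = true
    · have hxs := ih hp.2 (fun a ha b hb => hcl a (.tail _ ha) b (.tail _ hb))
      rw [List.filter_cons, List.filter_cons]
      simp only [hx, if_pos, Bool.not_true, Bool.false_eq_true, List.cons_append]
      exact congrArg _ hxs
    · have hall : ∀ b ∈ x :: xs, p b = false := by
        intro b hb
        rcases List.mem_cons.mp hb with rfl | hb
        · exact Bool.eq_false_iff.mpr hx
        · cases hpb : p b
          · rfl
          · exact absurd (hcl x (.head _) b (.tail _ hb) (le_of_lt (hp.1 b hb)) hpb) hx
      have h1 : (x :: xs).filter p = [] :=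
        List.filter_eq_nil_iff.mpr (fun a ha => by simp [hall a ha])
      have h2 : (x :: xs).filter (fun y => !(p y)) = x :: xs :=
        List.filter_eq_self.mpr (fun a ha => by simp [hall a ha])
      rw [h1, h2, List.nil_append]

lemma pv_sorted_ext (l1 l2 : List Int) (h1 : l1.Pairwise (· < ·)) (h2 : l2.Pairwise (· < ·))
    (h : ∀ x, x ∈ l1 ↔ x ∈ l2) : l1 = l2 := by
  have p : l1.Perm l2 := by
    refine List.perm_of_nodup_nodup_toFinset_eq h1.nodup h2.nodup ?_
    ext x; simp [List.mem_toFinset, h x]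
  exact p.eq_of_pairwise (fun a b _ _ hab hba => absurd hba (not_lt.mpr hab.le)) h1 h2

lemma pvD_pairwise (n : Int) : (pvD n).Pairwise (· < ·) :=
  (PySem.List.pairwise_lt_pyRange_one 1 (n + 1)).filter _

lemma pvS_one_eq (n : Int) :
    pvS n 1 = (pvD n).filter (fun d => decide (d * d ≤ n)) := by
  rw [pvS, pvD, List.filter_filter]
  exact List.filter_congr (fun d _ => Bool.and_comm _ _)

lemma pv_pos_factor {a b n : Int} (h : a * b = n) (hb : 1 ≤ b) (hn : 1 ≤ n) : 1 ≤ a := by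
  by_contra hc
  push Not at hc
  have hc' : a ≤ 0 := by omega
  have := mul_nonneg (neg_nonneg.mpr hc') (by linarith : (0 : Int) ≤ b)
  nlinarith

lemma pv_le_of_mul {a b n : Int} (h : a * b = n) (ha : 1 ≤ a) (hb : 1 ≤ b) : a ≤ n := by
  have := mul_nonneg (by linarith : (0 : Int) ≤ a) (by linarith : (0 : Int) ≤ b - 1)
  nlinarith

lemma pvL_one_rev_eq (n : Int) :
    (pvL n 1).reverse = (pvD n).filter (fun d => !(decide (d * d ≤ n))) := by
  apply pv_sorted_ext
  · -- (pvL n 1).reverse is strictly increasing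
    rw [List.pairwise_reverse, pvL, List.pairwise_map]
    refine List.Pairwise.imp_of_mem ?_ ((PySem.List.pairwise_lt_pyRange_one 1 (n + 1)).filter _)
    intro a b ha hb hab
    simp only [List.mem_filter, PySem.List.mem_pyRange_one, Bool.and_eq_true, beq_iff_eq,
      decide_eq_true_eq, PySem.Int.mod_eq_zero_iff_dvd] at ha hb
    obtain ⟨⟨ha1, _⟩, ⟨⟨hda, haa⟩, _⟩⟩ := ha
    obtain ⟨⟨hb1, _⟩, ⟨⟨hdb, hbb⟩, _⟩⟩ := hb
    have hfa : PySem.Int.floordiv n a * a = n := by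
      rw [PySem.Int.floordiv_eq_ediv_of_pos (by omega)]; exact Int.ediv_mul_cancel hda
    have hfb : PySem.Int.floordiv n b * b = n := by
      rw [PySem.Int.floordiv_eq_ediv_of_pos (by omega)]; exact Int.ediv_mul_cancel hdb
    have hn1 : 1 ≤ n := le_trans (le_trans ha1 (pv_le_sq a)) haa
    have hfbpos : 1 ≤ PySem.Int.floordiv n b := pv_pos_factor hfb hb1 hn1
    by_contra hc
    push Not at hc
    have h1 : PySem.Int.floordiv n a * a ≤ PySem.Int.floordiv n b * a :=
      mul_le_mul_of_nonneg_right hc (by linarith)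
    have h2 : PySem.Int.floordiv n b * a < PySem.Int.floordiv n b * b :=
      mul_lt_mul_of_pos_left hab (by linarith)
    linarith
  · exact (pvD_pairwise n).filter _
  · intro x
    simp only [List.mem_reverse, pvL, pvD, List.mem_map, List.mem_filter,
      PySem.List.mem_pyRange_one, Bool.and_eq_true, beq_iff_eq, decide_eq_true_eq,
      Bool.not_eq_true', decide_eq_false_iff_not, not_le,
      PySem.Int.mod_eq_zero_iff_dvd]
    constructor
    · rintro ⟨d, ⟨⟨hd1, _⟩, ⟨⟨hdd, hdle⟩, hdne⟩⟩, rfl⟩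
      have hd2 : d * d < n := lt_of_le_of_ne hdle hdne
      have hf : PySem.Int.floordiv n d * d = n := by
        rw [PySem.Int.floordiv_eq_ediv_of_pos (by omega)]; exact Int.ediv_mul_cancel hdd
      have hn1 : 1 ≤ n := le_trans (le_trans hd1 (pv_le_sq d)) hdle
      have hx1 : 1 ≤ PySem.Int.floordiv n d := pv_pos_factor hf hd1 hn1
      have hdx : d < PySem.Int.floordiv n d :=
        lt_of_mul_lt_mul_right (by linarith : d * d < PySem.Int.floordiv n d * d) (by linarith)
      have hxn : PySem.Int.floordiv n d ≤ n := pv_le_of_mul hf hx1 hd1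
      have hsq : PySem.Int.floordiv n d * d < PySem.Int.floordiv n d * PySem.Int.floordiv n d :=
        mul_lt_mul_of_pos_left hdx (by linarith)
      exact ⟨⟨⟨hx1, by linarith⟩, ⟨d, hf.symm⟩⟩, by linarith⟩
    · rintro ⟨⟨⟨hx1, hxn⟩, ⟨d, hd⟩⟩, hxx⟩
      have hn1 : 1 ≤ n := by linarith
      have hdxn : d * x = n := by rw [mul_comm]; exact hd.symm
      have hd1 : 1 ≤ d := pv_pos_factor hdxn hx1 hn1
      have hdx : d < x := by
        by_contra hc
        push Not at hc
        have := mul_le_mul_of_nonneg_left hc (by linarith : (0 : Int) ≤ x)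
        rw [← hd] at this
        linarith
      have hdd : d * d < n := by
        have := mul_lt_mul_of_pos_left hdx (by linarith : (0 : Int) < d)
        linarith
      refine ⟨d, ⟨⟨hd1, by linarith [pv_le_sq d]⟩,
        ⟨⟨⟨x, hdxn.symm⟩, le_of_lt hdd⟩, ne_of_lt hdd⟩⟩, ?_⟩
      rw [PySem.Int.floordiv_eq_ediv_of_pos (by omega : (0 : Int) < d), hd,
        Int.mul_ediv_cancel x (by omega : d ≠ 0)]

lemma pvB_eq_pvD (n : Int) : pvS n 1 ++ (pvL n 1).reverse = pvD n := by
  rw [pvS_one_eq, pvL_one_rev_eq]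
  refine (pv_split _ _ (pvD_pairwise n) ?_).symm
  intro a ha b hb hab hpb
  simp only [pvD, List.mem_filter, PySem.List.mem_pyRange_one] at ha hb
  simp only [decide_eq_true_eq] at hpb ⊢
  nlinarith [ha.1.1, hb.1.1]

lemma pvDivisors_eq (n clip : Int) : pvDivisorsB n clip = pvDivisorsA n clip := by
  rw [pvDivisorsB, pvSqrtLoop_spec n (n + 1 - 1).toNat 1 [] [] le_rfl rfl]
  simp only [List.nil_append]
  rw [pvB_eq_pvD, pvDivisorsA, pvD, List.filter_filter]
  exact List.filter_congr (fun d _ => Bool.and_comm _ _)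

lemma pv_combos (d1 d2 d3 : List Int) (op : Int) :
    d1.foldl (fun acc a =>
      d2.foldl (fun acc2 b =>
        d3.foldl (fun acc3 c =>
          if a * b * c ≤ op then acc3 ++ [[a, b, c]] else acc3) acc2) acc) []
      = d1.flatMap (fun a => d2.flatMap (fun b =>
          (d3.filter (fun c => decide (a * b * c ≤ op))).map (fun c => [a, b, c]))) := by
  have inner : ∀ (a b : Int) (acc : List (List Int)),
      d3.foldl (fun acc3 c => if a * b * c ≤ op then acc3 ++ [[a, b, c]] else acc3) acc
        = acc ++ (d3.filter (fun c => decide (a * b * c ≤ op))).map (fun c => [a, b, c]) :=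
    fun a b acc =>
      PySem.List.foldl_append_ite (fun c => a * b * c ≤ op) (fun c => [a, b, c]) d3 acc
  have mid : ∀ (a : Int) (acc : List (List Int)),
      d2.foldl (fun acc2 b =>
        d3.foldl (fun acc3 c => if a * b * c ≤ op then acc3 ++ [[a, b, c]] else acc3) acc2) acc
        = acc ++ d2.flatMap (fun b =>
            (d3.filter (fun c => decide (a * b * c ≤ op))).map (fun c => [a, b, c])) := by
    intro a acc
    rw [PySem.List.foldl_congr_mem d2 _
      (fun acc2 b => acc2 ++ (d3.filter (fun c => decide (a * b * c ≤ op))).map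
        (fun c => [a, b, c])) acc
      (fun acc2 b _ => inner a b acc2)]
    exact PySem.List.foldl_append_eq_flatMap _ d2 acc
  rw [PySem.List.foldl_congr_mem d1 _
    (fun acc a => acc ++ d2.flatMap (fun b =>
      (d3.filter (fun c => decide (a * b * c ≤ op))).map (fun c => [a, b, c]))) []
    (fun acc a _ => mid a acc)]
  rw [PySem.List.foldl_append_eq_flatMap]
  simp

-- ===== VERDICT (by name: the statement is the Claim_ definition above) =====
theorem generate_valid_combinations_spec : Claim_equal_generate_valid_combinations := by
  intro och ich iw och_clip ich_clip iw_clip op_clip _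
  simp only [Spec_generate_valid_combinations, generate_valid_combinations,
    generate_valid_combinations_alt]
  rw [pvDivisors_eq, pvDivisors_eq, pvDivisors_eq, pv_combos]
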